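-- pv_equiv track=rewrite | github.com/vanneall/MPS | electre.py | createSumOfWeightsOfCriteria
-- ===== SOURCE A (Python) =====
-- def createSumOfWeightsOfCriteria(matrix: list, supplier: list, criteriaWeight: list):
--     positiveSet = list()
--     negativeSet = list()
--     equalSet = list()
--     for i in range(len(supplier)):
--         positiveSet.append(createMatrixOfTheWeightsOfCriteria(matrix, criteriaWeight, 1, i))
--         negativeSet.append(createMatrixOfTheWeightsOfCriteria(matrix, criteriaWeight, -1, i))
--         equalSet.append(createMatrixOfTheWeightsOfCriteria(matrix, criteriaWeight, 0, i))
--     return positiveSet, negativeSet, equalSet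
--
-- def createMatrixOfTheWeightsOfCriteria(matrix: list, criteria: list, typeMatrix: int, supplierIndex: int):
--     set = list()
--     if typeMatrix == 1:
--         for i in range(len(matrix[supplierIndex])):
--             sum = 0
--             for j in range(len(matrix[supplierIndex][i])):
--                 if matrix[supplierIndex][i][j] == 1:
--                     sum += criteria[j]
--             set.append(sum)
--     elif typeMatrix == -1:
--         for i in range(len(matrix[supplierIndex])):
--             sum = 0
--             for j in range(len(matrix[supplierIndex][i])):
--                 if matrix[supplierIndex][i][j] == -1:
--                     sum += criteria[j]
--             set.append(sum)
--     else:
--         for i in range(len(matrix[supplierIndex])):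
--             sum = 0
--             for j in range(len(matrix[supplierIndex][i])):
--                 if matrix[supplierIndex][i][j] == 0:
--                     sum += criteria[j]
--             set.append(sum)
--     return set
-- ===== SOURCE B (Python) =====
-- def createSumOfWeightsOfCriteria(matrix: list, supplier: list, criteriaWeight: list):
--     positiveSet, negativeSet, equalSet = [], [], []
--     for rows in matrix[:len(supplier)]:
--         posRow, negRow, eqRow = [], [], []
--         for row in rows:
--             p = n = e = 0
--             for v, w in zip(row, criteriaWeight):
--                 if v == 1:
--                     p += w
--                 elif v == -1:
--                     n += w
--                 elif v == 0:
--                     e += w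
--             posRow.append(p)
--             negRow.append(n)
--             eqRow.append(e)
--         positiveSet.append(posRow)
--         negativeSet.append(negRow)
--         equalSet.append(eqRow)
--     return positiveSet, negativeSet, equalSet
-- ===== Notes on version B (the rewrite author's own statement) =====
-- stated objective: simpler
-- what changed: Replaced the branch-dispatching helper called three times per supplier (three separate index-based scans of the same submatrix) with a single traversal that zips each row with criteriaWeight and accumulates the positive/negative/equal weight sums simultaneously.
import Mathlib
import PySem

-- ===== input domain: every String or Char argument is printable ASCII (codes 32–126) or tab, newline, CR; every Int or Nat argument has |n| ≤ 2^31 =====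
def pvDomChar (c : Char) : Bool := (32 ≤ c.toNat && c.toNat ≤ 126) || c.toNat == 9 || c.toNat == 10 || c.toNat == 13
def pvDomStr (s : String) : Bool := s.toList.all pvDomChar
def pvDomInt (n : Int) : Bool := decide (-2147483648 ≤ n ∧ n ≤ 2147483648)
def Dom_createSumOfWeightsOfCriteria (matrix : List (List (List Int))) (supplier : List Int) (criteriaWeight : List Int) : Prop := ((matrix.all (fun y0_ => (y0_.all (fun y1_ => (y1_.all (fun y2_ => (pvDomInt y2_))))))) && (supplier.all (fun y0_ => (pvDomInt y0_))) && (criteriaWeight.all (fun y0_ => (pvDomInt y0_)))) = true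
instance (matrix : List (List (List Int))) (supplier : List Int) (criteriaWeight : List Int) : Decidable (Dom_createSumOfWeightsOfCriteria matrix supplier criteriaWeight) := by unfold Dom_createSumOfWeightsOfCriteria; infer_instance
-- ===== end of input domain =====

-- B replaces A's three repeated index-based scans through a branch-dispatching helper by
-- one combined zip-based traversal building all three result lists at once (objective: simpler).

-- ===== PORT A =====
-- helper createMatrixOfTheWeightsOfCriteria; indexing ported with pyGetD (in range under Pre_)
def createMatrixOfTheWeightsOfCriteria (matrix : List (List (List Int))) (criteria : List Int) (typeMatrix : Int) (supplierIndex : Int) : List Int :=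
  let rows := PySem.List.pyGetD matrix supplierIndex []
  if typeMatrix = 1 then
    (PySem.List.pyRange 0 (rows.length : Int) 1).foldl (fun st i =>
      let row := PySem.List.pyGetD rows i []
      st ++ [(PySem.List.pyRange 0 (row.length : Int) 1).foldl (fun s j =>
        if PySem.List.pyGetD row j 0 = 1 then s + PySem.List.pyGetD criteria j 0 else s) 0]) []
  else if typeMatrix = -1 then
    (PySem.List.pyRange 0 (rows.length : Int) 1).foldl (fun st i =>
      let row := PySem.List.pyGetD rows i []
      st ++ [(PySem.List.pyRange 0 (row.length : Int) 1).foldl (fun s j =>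
        if PySem.List.pyGetD row j 0 = -1 then s + PySem.List.pyGetD criteria j 0 else s) 0]) []
  else
    (PySem.List.pyRange 0 (rows.length : Int) 1).foldl (fun st i =>
      let row := PySem.List.pyGetD rows i []
      st ++ [(PySem.List.pyRange 0 (row.length : Int) 1).foldl (fun s j =>
        if PySem.List.pyGetD row j 0 = 0 then s + PySem.List.pyGetD criteria j 0 else s) 0]) []

def createSumOfWeightsOfCriteria (matrix : List (List (List Int))) (supplier : List Int) (criteriaWeight : List Int) : List (List Int) × List (List Int) × List (List Int) :=
  (PySem.List.pyRange 0 (supplier.length : Int) 1).foldl (fun st i =>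
    (st.1 ++ [createMatrixOfTheWeightsOfCriteria matrix criteriaWeight 1 i],
     st.2.1 ++ [createMatrixOfTheWeightsOfCriteria matrix criteriaWeight (-1) i],
     st.2.2 ++ [createMatrixOfTheWeightsOfCriteria matrix criteriaWeight 0 i])) ([], [], [])

-- ===== PORT B =====
-- per-row single scan over zip(row, criteriaWeight): the three sums at once
def pvRowTriple (criteriaWeight : List Int) (row : List Int) : Int × Int × Int :=
  (row.zip criteriaWeight).foldl (fun a vw =>
    if vw.1 = 1 then (a.1 + vw.2, a.2.1, a.2.2)
    else if vw.1 = -1 then (a.1, a.2.1 + vw.2, a.2.2)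
    else if vw.1 = 0 then (a.1, a.2.1, a.2.2 + vw.2)
    else a) (0, 0, 0)

def pvRowsTriple (criteriaWeight : List Int) (rows : List (List Int)) : List Int × List Int × List Int :=
  rows.foldl (fun a row =>
    let t := pvRowTriple criteriaWeight row
    (a.1 ++ [t.1], a.2.1 ++ [t.2.1], a.2.2 ++ [t.2.2])) ([], [], [])

def createSumOfWeightsOfCriteria_alt (matrix : List (List (List Int))) (supplier : List Int) (criteriaWeight : List Int) : List (List Int) × List (List Int) × List (List Int) :=
  (matrix.take supplier.length).foldl (fun st rows =>
    let r := pvRowsTriple criteriaWeight rows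
    (st.1 ++ [r.1], st.2.1 ++ [r.2.1], st.2.2 ++ [r.2.2])) ([], [], [])

-- ===== PRECONDITION & SPEC =====
-- Pre_ excludes exactly the inputs where A raises IndexError: a supplier index beyond
-- len(matrix), or a cell in {1,-1,0} at a column beyond len(criteriaWeight) (criteria[j] out of range).
def Pre_createSumOfWeightsOfCriteria (matrix : List (List (List Int))) (supplier : List Int) (criteriaWeight : List Int) : Prop :=
  supplier.length ≤ matrix.length ∧
  ∀ rows ∈ matrix.take supplier.length, ∀ row ∈ rows,
    ∀ v ∈ row.drop criteriaWeight.length, ¬(v = 1 ∨ v = -1 ∨ v = 0)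

instance (matrix : List (List (List Int))) (supplier : List Int) (criteriaWeight : List Int) : Decidable (Pre_createSumOfWeightsOfCriteria matrix supplier criteriaWeight) := by unfold Pre_createSumOfWeightsOfCriteria; infer_instance

def pvWitness_createSumOfWeightsOfCriteria : List (List (List Int)) × List Int × List Int :=
  ([[[1, -1], [0, 1]], [[-1, 0]]], [10, 20], [3, 5])

def Spec_createSumOfWeightsOfCriteria (matrix : List (List (List Int))) (supplier : List Int) (criteriaWeight : List Int) (out : List (List Int) × List (List Int) × List (List Int)) : Prop := out = createSumOfWeightsOfCriteria_alt matrix supplier criteriaWeight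
instance (matrix : List (List (List Int))) (supplier : List Int) (criteriaWeight : List Int) (out : List (List Int) × List (List Int) × List (List Int)) : Decidable (Spec_createSumOfWeightsOfCriteria matrix supplier criteriaWeight out) := by unfold Spec_createSumOfWeightsOfCriteria; infer_instance

-- ===== CLAIM (what is proved, stated in full; the proofs are below) =====
def Claim_equal_createSumOfWeightsOfCriteria : Prop := ∀ (matrix : List (List (List Int))) (supplier : List Int) (criteriaWeight : List Int), Dom_createSumOfWeightsOfCriteria matrix supplier criteriaWeight → Pre_createSumOfWeightsOfCriteria matrix supplier criteriaWeight → Spec_createSumOfWeightsOfCriteria matrix supplier criteriaWeight (createSumOfWeightsOfCriteria matrix supplier criteriaWeight)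

-- ===== LEMMAS AND PROOFS =====

-- a fold appending to three lists is three maps
theorem pv_foldl_triple_append {α : Type} (l : List α) (f g h : α → List Int)
    (p q r : List (List Int)) :
    l.foldl (fun st x => (st.1 ++ [f x], st.2.1 ++ [g x], st.2.2 ++ [h x])) (p, q, r)
      = (p ++ l.map f, q ++ l.map g, r ++ l.map h) := by
  induction l generalizing p q r with
  | nil => simp
  | cons a t ih => simp [List.foldl_cons, ih]

theorem pv_foldl_triple_append3 {α : Type} (l : List α)
    (f g h : α → Int) (p q r : List Int) :
    l.foldl (fun st x => (st.1 ++ [f x], st.2.1 ++ [g x], st.2.2 ++ [h x])) (p, q, r)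
      = (p ++ l.map f, q ++ l.map g, r ++ l.map h) := by
  induction l generalizing p q r with
  | nil => simp
  | cons a t ih => simp [List.foldl_cons, ih]

-- pvRowTriple as three independent folds over the zip
theorem pv_rowTriple_eq (l : List (Int × Int)) (a b c : Int) :
    l.foldl (fun a vw =>
      if vw.1 = 1 then (a.1 + vw.2, a.2.1, a.2.2)
      else if vw.1 = -1 then (a.1, a.2.1 + vw.2, a.2.2)
      else if vw.1 = 0 then (a.1, a.2.1, a.2.2 + vw.2)
      else a) (a, b, c)
    = (l.foldl (fun s vw => if vw.1 = 1 then s + vw.2 else s) a,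
       l.foldl (fun s vw => if vw.1 = -1 then s + vw.2 else s) b,
       l.foldl (fun s vw => if vw.1 = 0 then s + vw.2 else s) c) := by
  induction l generalizing a b c with
  | nil => rfl
  | cons x t ih =>
    simp only [List.foldl_cons]
    by_cases h1 : x.1 = 1
    · simp [h1, ih]
    · by_cases h2 : x.1 = -1
      · simp [h1, h2, ih]
      · by_cases h3 : x.1 = 0
        · simp [h1, h2, h3, ih]
        · simp [h1, h2, h3, ih]

-- A's inner index fold equals B's zip fold: cells beyond criteria are never in {1,-1,0}
theorem pv_foldl_id (l : List Int) (R : Int) : l.foldl (fun s _ => s) R = R := by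
  induction l generalizing R with
  | nil => rfl
  | cons x t ih => simp [List.foldl_cons, ih]

theorem pv_inner_eq (row criteria : List Int) (t : Int)
    (ht : t = 1 ∨ t = -1 ∨ t = 0)
    (h : ∀ v ∈ row.drop criteria.length, ¬(v = 1 ∨ v = -1 ∨ v = 0)) (c : Int) :
    (PySem.List.pyRange 0 (row.length : Int) 1).foldl (fun s j =>
        if PySem.List.pyGetD row j 0 = t then s + PySem.List.pyGetD criteria j 0 else s) c
    = (row.zip criteria).foldl (fun s vw => if vw.1 = t then s + vw.2 else s) c := by
  have hzr : (row.zip criteria).length ≤ row.length := by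
    simp [List.length_zip]
  have hzc : (row.zip criteria).length ≤ criteria.length := by
    simp [List.length_zip]
  have hsplit := PySem.List.pyRange_one_append 0 ((row.zip criteria).length : Int)
    (row.length : Int) (by positivity) (by exact_mod_cast hzr)
  rw [hsplit, List.foldl_append]
  have h1 : (PySem.List.pyRange 0 ((row.zip criteria).length : Int) 1).foldl (fun s j =>
        if PySem.List.pyGetD row j 0 = t then s + PySem.List.pyGetD criteria j 0 else s) c
      = (row.zip criteria).foldl (fun s vw => if vw.1 = t then s + vw.2 else s) c := by
    rw [PySem.List.foldl_congr_mem (g := fun s j =>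
        (fun (s : Int) (vw : Int × Int) => if vw.1 = t then s + vw.2 else s) s
          (PySem.List.pyGetD (row.zip criteria) j (0, 0)))]
    · exact PySem.List.foldl_pyRange_zero_pyGetD' (row.zip criteria) (0, 0)
        (fun s vw => if vw.1 = t then s + vw.2 else s) c
    · intro acc j hj
      obtain ⟨h0, hlt⟩ := (PySem.List.mem_pyRange_one).1 hj
      have hltz : j < ((row.zip criteria).length : Int) := hlt
      have hltr : j < (row.length : Int) := by
        have := (Int.ofNat_le).2 hzr; omega
      have hltc : j < (criteria.length : Int) := by
        have := (Int.ofNat_le).2 hzc; omega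
      rw [PySem.List.pyGetD_eq_getElem _ _ h0 hltz,
          PySem.List.pyGetD_eq_getElem _ _ h0 hltr,
          PySem.List.pyGetD_eq_getElem _ _ h0 hltc]
      simp
  rw [h1]
  rw [PySem.List.foldl_congr_mem (g := fun (s : Int) (_ : Int) => s)]
  · exact pv_foldl_id _ _
  · intro acc j hj
    obtain ⟨hlo, hlt⟩ := (PySem.List.mem_pyRange_one).1 hj
    have h0 : (0 : Int) ≤ j := le_trans (by positivity) hlo
    rw [PySem.List.pyGetD_eq_getElem _ _ h0 hlt]
    have hjc : criteria.length ≤ j.toNat := by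
      have hz : (row.zip criteria).length = min row.length criteria.length := by
        simp [List.length_zip]
      rw [hz] at hlo
      have hlt' : j.toNat < row.length := by omega
      omega
    have hjr : j.toNat < row.length := by omega
    have hdlt : j.toNat - criteria.length < (row.drop criteria.length).length := by
      simp [List.length_drop]; omega
    have hmem := List.getElem_mem hdlt
    rw [List.getElem_drop] at hmem
    have hidx : criteria.length + (j.toNat - criteria.length) = j.toNat := by omega
    simp only [hidx] at hmem
    have hne : row[j.toNat] ≠ t := by
      have hv := h _ hmem
      rcases ht with rfl | rfl | rfl <;> tauto
    rw [if_neg hne]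

-- A's helper per supplier index equals B's one-pass per-supplier triple
theorem pv_cmow_eq_rows (matrix : List (List (List Int))) (cw : List Int) (k : Nat)
    (hk : k < matrix.length)
    (hrow : ∀ row ∈ matrix[k], ∀ v ∈ row.drop cw.length, ¬(v = 1 ∨ v = -1 ∨ v = 0)) :
    createMatrixOfTheWeightsOfCriteria matrix cw 1 (k : Int) = (pvRowsTriple cw matrix[k]).1 ∧
    createMatrixOfTheWeightsOfCriteria matrix cw (-1) (k : Int) = (pvRowsTriple cw matrix[k]).2.1 ∧
    createMatrixOfTheWeightsOfCriteria matrix cw 0 (k : Int) = (pvRowsTriple cw matrix[k]).2.2 := by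
  have hrows : PySem.List.pyGetD matrix (k : Int) [] = matrix[k] := by
    rw [PySem.List.pyGetD_natCast]; exact List.getD_eq_getElem _ _ hk
  have hcomp : ∀ t : Int, (t = 1 ∨ t = -1 ∨ t = 0) →
      (PySem.List.pyRange 0 (((matrix[k] : List (List Int)).length : Nat) : Int) 1).foldl (fun st i =>
        st ++ [(PySem.List.pyRange 0 (((PySem.List.pyGetD matrix[k] i []).length : Nat) : Int) 1).foldl (fun s j =>
          if PySem.List.pyGetD (PySem.List.pyGetD matrix[k] i []) j 0 = t
          then s + PySem.List.pyGetD cw j 0 else s) 0]) []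
      = (matrix[k] : List (List Int)).map (fun row =>
          (row.zip cw).foldl (fun s vw => if vw.1 = t then s + vw.2 else s) 0) := by
    intro t ht
    rw [PySem.List.foldl_append_singleton_eq_map]
    rw [show (fun i => (PySem.List.pyRange 0 (((PySem.List.pyGetD matrix[k] i []).length : Nat) : Int) 1).foldl
          (fun s j => if PySem.List.pyGetD (PySem.List.pyGetD matrix[k] i []) j 0 = t
            then s + PySem.List.pyGetD cw j 0 else s) 0)
        = (fun row : List Int => (PySem.List.pyRange 0 ((row.length : Nat) : Int) 1).foldl
          (fun s j => if PySem.List.pyGetD row j 0 = t then s + PySem.List.pyGetD cw j 0 else s) 0)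
          ∘ (fun i => PySem.List.pyGetD matrix[k] i []) from rfl]
    rw [← List.map_map, PySem.List.map_pyGetD_pyRange_zero']
    simp only [List.nil_append]
    exact List.map_congr_left (fun row hr => pv_inner_eq row cw t ht (hrow row hr) 0)
  have hrt : ∀ row : List Int, pvRowTriple cw row
      = ((row.zip cw).foldl (fun s vw => if vw.1 = 1 then s + vw.2 else s) 0,
         (row.zip cw).foldl (fun s vw => if vw.1 = -1 then s + vw.2 else s) 0,
         (row.zip cw).foldl (fun s vw => if vw.1 = 0 then s + vw.2 else s) 0) := by
    intro row; unfold pvRowTriple; exact pv_rowTriple_eq (row.zip cw) 0 0 0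
  have hB : pvRowsTriple cw matrix[k]
      = ([] ++ (matrix[k] : List (List Int)).map (fun row => (pvRowTriple cw row).1),
         [] ++ (matrix[k] : List (List Int)).map (fun row => (pvRowTriple cw row).2.1),
         [] ++ (matrix[k] : List (List Int)).map (fun row => (pvRowTriple cw row).2.2)) := by
    unfold pvRowsTriple
    exact pv_foldl_triple_append3 (matrix[k] : List (List Int)) _ _ _ [] [] []
  refine ⟨?_, ?_, ?_⟩
  · unfold createMatrixOfTheWeightsOfCriteria
    simp only [hrows, if_true, if_false]
    rw [hcomp 1 (by norm_num), hB]
    simp only [List.nil_append]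
    exact (List.map_congr_left (fun row _ => by rw [hrt])).symm
  · unfold createMatrixOfTheWeightsOfCriteria
    simp only [hrows, if_true, if_false]
    rw [hcomp (-1) (by norm_num), hB]
    simp only [List.nil_append]
    exact (List.map_congr_left (fun row _ => by rw [hrt])).symm
  · unfold createMatrixOfTheWeightsOfCriteria
    simp only [hrows, if_true, if_false]
    rw [hcomp 0 (by norm_num), hB]
    simp only [List.nil_append]
    exact (List.map_congr_left (fun row _ => by rw [hrt])).symm

theorem createSumOfWeightsOfCriteria_spec : Claim_equal_createSumOfWeightsOfCriteria := by
  intro matrix supplier cw _ hpre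
  obtain ⟨hlen, hrows⟩ := hpre
  unfold Spec_createSumOfWeightsOfCriteria
  unfold createSumOfWeightsOfCriteria createSumOfWeightsOfCriteria_alt
  rw [pv_foldl_triple_append]
  have hB : (matrix.take supplier.length).foldl (fun st rows =>
      let r := pvRowsTriple cw rows
      (st.1 ++ [r.1], st.2.1 ++ [r.2.1], st.2.2 ++ [r.2.2])) ([], [], [])
      = ([] ++ (matrix.take supplier.length).map (fun rows => (pvRowsTriple cw rows).1),
         [] ++ (matrix.take supplier.length).map (fun rows => (pvRowsTriple cw rows).2.1),
         [] ++ (matrix.take supplier.length).map (fun rows => (pvRowsTriple cw rows).2.2)) :=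
    pv_foldl_triple_append (matrix.take supplier.length) _ _ _ [] [] []
  rw [hB]
  have hmaps : ∀ (t : Int) (f : List (List Int) → List Int),
      (∀ (k : Nat) (hk : k < matrix.length), k < supplier.length →
        createMatrixOfTheWeightsOfCriteria matrix cw t (k : Int) = f matrix[k]) →
      (PySem.List.pyRange 0 (supplier.length : Int) 1).map
          (fun i => createMatrixOfTheWeightsOfCriteria matrix cw t i)
        = (matrix.take supplier.length).map f := by
    intro t f hpt
    apply List.ext_getElem
    · simp [PySem.List.length_pyRange_one]; omega
    · intro k hk1 hk2
      have hks : k < supplier.length := by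
        have := hk2; simp [List.length_take] at this; omega
      have hkm : k < matrix.length := lt_of_lt_of_le hks hlen
      simp only [List.getElem_map, PySem.List.getElem_pyRange_one, List.getElem_take]
      rw [show (0 : Int) + (k : Int) = (k : Int) by ring]
      exact hpt k hkm hks
  have hrq : ∀ (k : Nat) (hk : k < matrix.length), k < supplier.length →
      ∀ row ∈ matrix[k], ∀ v ∈ row.drop cw.length, ¬(v = 1 ∨ v = -1 ∨ v = 0) := by
    intro k hk hks row hr
    exact hrows matrix[k] (by rw [List.mem_take_iff_getElem] ; exact ⟨k, by omega, rfl⟩) row hr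
  simp only [List.nil_append]
  refine Prod.ext ?_ (Prod.ext ?_ ?_)
  · exact hmaps 1 _ (fun k hk hks => (pv_cmow_eq_rows matrix cw k hk (hrq k hk hks)).1)
  · exact hmaps (-1) _ (fun k hk hks => (pv_cmow_eq_rows matrix cw k hk (hrq k hk hks)).2.1)
  · exact hmaps 0 _ (fun k hk hks => (pv_cmow_eq_rows matrix cw k hk (hrq k hk hks)).2.2)
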